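-- pv_equiv track=rewrite | github.com/rg98/aoc2024 | 8-1.py | get_antennas
-- ===== SOURCE A (Python) =====
-- def get_antennas(grid):
--     antennas = {}
--     for y, row in enumerate(grid):
--         for x, c in enumerate(row):
--             if c != '.':
--                 if c in antennas.keys():
--                     antennas[c].append((x, y))
--                 else:
--                     antennas[c] = [(x, y)]
--     return antennas
-- ===== SOURCE B (Python) =====
-- def get_antennas(grid):
--     # gather-then-group: flat list of (freq, x, y), ordered distinct keys, one filter pass per key
--     cells = [(c, x, y) for y, row in enumerate(grid) for x, c in enumerate(row) if c != '.']
--     keys = list(dict.fromkeys(c for c, _, _ in cells))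
--     return {k: [(x, y) for c, x, y in cells if c == k] for k in keys}
-- ===== Notes on version B (the rewrite author's own statement) =====
-- stated objective: alternative
-- what changed: Replaces the incremental per-character dict-appending loop by a gather-then-group pipeline: one pass collects (freq,x,y) triples, keys are deduplicated in first-occurrence order, and each group is produced by a filter over the flat list.
import Mathlib
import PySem

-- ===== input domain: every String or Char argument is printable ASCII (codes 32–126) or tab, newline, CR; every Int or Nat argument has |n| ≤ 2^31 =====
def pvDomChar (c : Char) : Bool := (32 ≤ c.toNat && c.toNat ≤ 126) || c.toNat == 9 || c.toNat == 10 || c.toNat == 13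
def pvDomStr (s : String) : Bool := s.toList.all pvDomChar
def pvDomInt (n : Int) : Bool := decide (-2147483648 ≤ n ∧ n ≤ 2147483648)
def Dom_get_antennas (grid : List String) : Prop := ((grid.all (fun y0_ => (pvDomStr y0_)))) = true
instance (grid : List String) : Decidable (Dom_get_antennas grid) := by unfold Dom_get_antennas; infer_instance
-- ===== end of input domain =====

-- B replaces A's incremental per-character dict-appending loop by a gather-then-group
-- pipeline (flat cell list, ordered-dedup keys, one filter per key); alternative decomposition, not faster.


-- ===== PORT A =====
def get_antennas (grid : List String) : List (String × List (Int × Int)) :=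
  ((PySem.List.enumerate grid).foldl (fun antennas yrow =>
      (PySem.List.enumerate yrow.2.toList).foldl (fun antennas xc =>
        if String.mk [xc.2] ≠ "." then
          if antennas.contains (String.mk [xc.2]) then
            antennas.insert (String.mk [xc.2])
              (antennas.getD (String.mk [xc.2]) [] ++ [(xc.1, yrow.1)])
          else
            antennas.insert (String.mk [xc.2]) [(xc.1, yrow.1)]
        else antennas) antennas)
    PySem.Dict.empty).items

-- ===== PORT B =====
def get_antennas_alt (grid : List String) : List (String × List (Int × Int)) :=
  let cells : List (String × Int × Int) :=
    (PySem.List.enumerate grid).flatMap (fun yrow =>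
      (PySem.List.enumerate yrow.2.toList).filterMap (fun xc =>
        if String.mk [xc.2] ≠ "." then some (String.mk [xc.2], xc.1, yrow.1) else none))
  let keys := PySem.List.dedup (cells.map (·.1))
  keys.map (fun k => (k, (cells.filter (fun p => p.1 == k)).map (fun p => p.2)))

-- ===== PRECONDITION & SPEC =====
def Spec_get_antennas (grid : List String) (out : List (String × List (Int × Int))) : Prop := out = get_antennas_alt grid
instance (grid : List String) (out : List (String × List (Int × Int))) : Decidable (Spec_get_antennas grid out) := by unfold Spec_get_antennas; infer_instance

-- ===== CLAIM (what is proved, stated in full; the proofs are below) =====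
def Claim_equal_get_antennas : Prop := ∀ (grid : List String), Dom_get_antennas grid → Spec_get_antennas grid (get_antennas grid)

-- ===== LEMMAS AND PROOFS =====

-- B's flat cell list, named for the proofs
def pvCells (grid : List String) : List (String × Int × Int) :=
  (PySem.List.enumerate grid).flatMap (fun yrow =>
    (PySem.List.enumerate yrow.2.toList).filterMap (fun xc =>
      if String.mk [xc.2] ≠ "." then some (String.mk [xc.2], xc.1, yrow.1) else none))

-- A's conditional insert step is Dict.modify with default []
theorem pvStep_eq_modify (d : PySem.Dict String (List (Int × Int))) (k : String) (v : Int × Int) :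
    (if d.contains k then d.insert k (d.getD k [] ++ [v]) else d.insert k [v])
      = d.modify k [] (· ++ [v]) := by
  by_cases h : d.contains k
  · simp [h, PySem.Dict.modify, PySem.Dict.getD_eq_get?_getD]
  · rw [Bool.not_eq_true] at h
    simp [h, PySem.Dict.modify, PySem.Dict.getD_of_not_contains d [] h]

-- inner row loop of A equals the modify-fold over that row's selected cells
theorem pvInner (y : Int) (l : List (Int × Char)) (d : PySem.Dict String (List (Int × Int))) :
    l.foldl (fun antennas xc =>
        if String.mk [xc.2] ≠ "." then
          if antennas.contains (String.mk [xc.2]) then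
            antennas.insert (String.mk [xc.2])
              (antennas.getD (String.mk [xc.2]) [] ++ [(xc.1, y)])
          else
            antennas.insert (String.mk [xc.2]) [(xc.1, y)]
        else antennas) d
    = (l.filterMap (fun xc =>
        if String.mk [xc.2] ≠ "." then some (String.mk [xc.2], xc.1, y) else none)).foldl
        (fun d p => d.modify p.1 [] (· ++ [p.2])) d := by
  induction l generalizing d with
  | nil => rfl
  | cons a l ih =>
    by_cases h : String.mk [a.2] ≠ "."
    · simp only [List.foldl_cons, List.filterMap_cons, if_pos h]
      rw [pvStep_eq_modify]
      exact ih _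
    · simp only [List.foldl_cons, List.filterMap_cons, if_neg h]
      exact ih d

-- A's nested loop is the modify-fold over the flat cell list
theorem pvA_eq_fold_cells (grid : List String) :
    ((PySem.List.enumerate grid).foldl (fun antennas yrow =>
      (PySem.List.enumerate yrow.2.toList).foldl (fun antennas xc =>
        if String.mk [xc.2] ≠ "." then
          if antennas.contains (String.mk [xc.2]) then
            antennas.insert (String.mk [xc.2])
              (antennas.getD (String.mk [xc.2]) [] ++ [(xc.1, yrow.1)])
          else
            antennas.insert (String.mk [xc.2]) [(xc.1, yrow.1)]
        else antennas) antennas)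
      PySem.Dict.empty)
    = (pvCells grid).foldl (fun d p => d.modify p.1 [] (· ++ [p.2])) PySem.Dict.empty := by
  rw [pvCells, List.foldl_flatMap]
  apply PySem.List.foldl_congr_mem
  intro d yrow _
  exact pvInner yrow.1 (PySem.List.enumerate yrow.2.toList) d

-- ===== VERDICT (by name: the statement is the Claim_ definition above) =====
theorem get_antennas_spec : Claim_equal_get_antennas := by
  intro grid _
  show get_antennas grid = get_antennas_alt grid
  rw [get_antennas, get_antennas_alt, pvA_eq_fold_cells]
  show _ = (PySem.List.dedup ((pvCells grid).map (·.1))).map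
      (fun k => (k, ((pvCells grid).filter (fun p => p.1 == k)).map (fun p => p.2)))
  have hkeys : ((pvCells grid).foldl (fun d p => d.modify p.1 [] (· ++ [p.2]))
        PySem.Dict.empty).keys
      = PySem.Set.ofList ((pvCells grid).map (·.1)) := by
    rw [PySem.Dict.keys_foldl_modify_key (pvCells grid) (·.1) [] (fun _ p l => l ++ [p.2])]
    simp [PySem.Dict.keys_empty, PySem.Set.update_nil_left]
  rw [PySem.Dict.items_eq_map_keys _ (by rw [hkeys]; exact PySem.Set.nodup_ofList _) [],
      hkeys, PySem.List.dedup_eq_ofList]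
  apply List.map_congr_left
  intro k _
  rw [PySem.Dict.getD_foldl_modify_append]
  simp [PySem.Dict.getD_empty]
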